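-- pv_equiv track=rewrite | github.com/onyuki/1400-zadach-po-programmirivaniu | 4.51-4.76.py | box_in_suitcase
-- ===== SOURCE A (Python) =====
-- def box_in_suitcase(a1, a2, a3, b1, b2, b3):
--     from itertools import permutations
--     suitcase = (a1, a2, a3)
--     box = (b1, b2, b3)
--     for perm in permutations(box):
--         if all(perm[i] <= suitcase[i] for i in range(3)):
--             return True
--     return False
-- ===== SOURCE B (Python) =====
-- def box_in_suitcase(a1, a2, a3, b1, b2, b3):
--     s = sorted((a1, a2, a3))
--     c = sorted((b1, b2, b3))
--     return c[0] <= s[0] and c[1] <= s[1] and c[2] <= s[2]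
-- ===== Notes on version B (the rewrite author's own statement) =====
-- stated objective: simpler
-- what changed: Replaced the 6-permutation search over the box's axes by sorting both triples once and comparing them componentwise (exchange argument: a fitting permutation exists iff the sorted triples compare pointwise).
import Mathlib
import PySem

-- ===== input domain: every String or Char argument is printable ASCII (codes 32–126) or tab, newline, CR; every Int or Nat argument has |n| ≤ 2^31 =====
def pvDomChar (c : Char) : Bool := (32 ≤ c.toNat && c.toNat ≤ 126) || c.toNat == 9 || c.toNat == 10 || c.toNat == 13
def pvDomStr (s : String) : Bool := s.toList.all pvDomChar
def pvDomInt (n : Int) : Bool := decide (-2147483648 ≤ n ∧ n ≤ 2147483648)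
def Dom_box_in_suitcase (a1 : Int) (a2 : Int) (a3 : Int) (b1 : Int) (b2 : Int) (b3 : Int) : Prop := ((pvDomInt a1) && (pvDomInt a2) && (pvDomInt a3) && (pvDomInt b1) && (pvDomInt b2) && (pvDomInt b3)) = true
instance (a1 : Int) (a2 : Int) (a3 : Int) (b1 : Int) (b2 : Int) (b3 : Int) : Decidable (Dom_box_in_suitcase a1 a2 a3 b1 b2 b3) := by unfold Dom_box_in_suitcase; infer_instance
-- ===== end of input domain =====

-- B replaces A's 6-permutation search with sort-both-triples-and-compare-componentwise (simpler, single pass).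


-- ===== PORT A =====
-- itertools.permutations((b1,b2,b3)) in order; each disjunct is 'all(perm[i] <= suitcase[i])';
-- the early 'return True' is the ||-chain.
def box_in_suitcase (a1 : Int) (a2 : Int) (a3 : Int) (b1 : Int) (b2 : Int) (b3 : Int) : Bool :=
  (decide (b1 ≤ a1) && decide (b2 ≤ a2) && decide (b3 ≤ a3)) ||
  (decide (b1 ≤ a1) && decide (b3 ≤ a2) && decide (b2 ≤ a3)) ||
  (decide (b2 ≤ a1) && decide (b1 ≤ a2) && decide (b3 ≤ a3)) ||
  (decide (b2 ≤ a1) && decide (b3 ≤ a2) && decide (b1 ≤ a3)) ||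
  (decide (b3 ≤ a1) && decide (b1 ≤ a2) && decide (b2 ≤ a3)) ||
  (decide (b3 ≤ a1) && decide (b2 ≤ a2) && decide (b1 ≤ a3))

-- ===== PORT B =====
-- sorted(...) → PySem.List.sorted; c[i]/s[i] are in-range indexings of 3-element lists (getD).
def box_in_suitcase_alt (a1 : Int) (a2 : Int) (a3 : Int) (b1 : Int) (b2 : Int) (b3 : Int) : Bool :=
  let s := PySem.List.sorted [a1, a2, a3] (fun x => x) false
  let c := PySem.List.sorted [b1, b2, b3] (fun x => x) false
  decide (c.getD 0 0 ≤ s.getD 0 0) && decide (c.getD 1 0 ≤ s.getD 1 0) && decide (c.getD 2 0 ≤ s.getD 2 0)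

-- ===== PRECONDITION & SPEC =====
def Spec_box_in_suitcase (a1 : Int) (a2 : Int) (a3 : Int) (b1 : Int) (b2 : Int) (b3 : Int) (out : Bool) : Prop := out = box_in_suitcase_alt a1 a2 a3 b1 b2 b3
instance (a1 : Int) (a2 : Int) (a3 : Int) (b1 : Int) (b2 : Int) (b3 : Int) (out : Bool) : Decidable (Spec_box_in_suitcase a1 a2 a3 b1 b2 b3 out) := by unfold Spec_box_in_suitcase; infer_instance

-- ===== CLAIM (what is proved, stated in full; the proofs are below) =====
def Claim_equal_box_in_suitcase : Prop := ∀ (a1 : Int) (a2 : Int) (a3 : Int) (b1 : Int) (b2 : Int) (b3 : Int), Dom_box_in_suitcase a1 a2 a3 b1 b2 b3 → Spec_box_in_suitcase a1 a2 a3 b1 b2 b3 (box_in_suitcase a1 a2 a3 b1 b2 b3)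

-- ===== LEMMAS AND PROOFS =====

-- sorted on a 3-element Int list, characterised by case analysis on the comparisons.
theorem sorted3 (x y z : Int) :
    PySem.List.sorted [x, y, z] (fun v => v) false =
      if x ≤ y then (if y ≤ z then [x, y, z] else if x ≤ z then [x, z, y] else [z, x, y])
      else (if x ≤ z then [y, x, z] else if y ≤ z then [y, z, x] else [z, y, x]) := by
  split_ifs with h1 h2 h3 h4 h5
  · exact PySem.List.sorted_id_eq_of_perm_of_pairwise _ _ (List.Perm.refl _)
      (by simp [List.pairwise_cons]; omega)
  · exact PySem.List.sorted_id_eq_of_perm_of_pairwise _ _ (List.Perm.cons x (List.Perm.swap y z []))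
      (by simp [List.pairwise_cons]; omega)
  · exact PySem.List.sorted_id_eq_of_perm_of_pairwise _ _
      (List.Perm.trans (List.Perm.swap x z [y]) (List.Perm.cons x (List.Perm.swap y z [])))
      (by simp [List.pairwise_cons]; omega)
  · exact PySem.List.sorted_id_eq_of_perm_of_pairwise _ _ (List.Perm.swap x y [z])
      (by simp [List.pairwise_cons]; omega)
  · exact PySem.List.sorted_id_eq_of_perm_of_pairwise _ _
      (List.Perm.trans (List.Perm.cons y (List.Perm.swap x z [])) (List.Perm.swap x y [z]))
      (by simp [List.pairwise_cons]; omega)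
  · exact PySem.List.sorted_id_eq_of_perm_of_pairwise _ _
      (List.Perm.trans (List.Perm.swap y z [x])
        (List.Perm.trans (List.Perm.cons y (List.Perm.swap x z [])) (List.Perm.swap x y [z])))
      (by simp [List.pairwise_cons]; omega)

-- ===== VERDICT (by name: the statement is the Claim_ definition above) =====
theorem box_in_suitcase_spec : Claim_equal_box_in_suitcase := by
  intro a1 a2 a3 b1 b2 b3 _
  unfold Spec_box_in_suitcase box_in_suitcase box_in_suitcase_alt
  rw [sorted3 a1 a2 a3, sorted3 b1 b2 b3]
  split_ifs <;>
    simp only [List.getD_cons_zero, List.getD_cons_succ, ← Bool.decide_and, ← Bool.decide_or,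
      decide_eq_decide] <;>
    omega
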